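-- pv_equiv track=rewrite | github.com/wushuoran/COMP3208Task4 | lfm2.py | data_statistics
-- ===== SOURCE A (Python) =====
-- def data_statistics(data):
--     max_u = 0
--     max_i = 0
--     min_u = 10000
--     min_i = 10000
--     for triple in data:
--         u, i = triple[0], triple[1]
--         if u >= max_u:
--             max_u = u
--
--         if i >= max_i:
--             max_i = i
--
--         if u<=min_u:
--             min_u=u
--
--         if i<=min_i:
--             min_i=i
--     return max_u + 1, max_i + 1   #因为用户和物品矩阵索引是0开头，+1后可以直接将max_u作为矩阵索引
-- ===== SOURCE B (Python) =====
-- def data_statistics(data):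
--     us = sorted([t[0] for t in data] + [0], reverse=True)
--     its = sorted([t[1] for t in data] + [0], reverse=True)
--     return us[0] + 1, its[0] + 1
-- ===== Notes on version B (the rewrite author's own statement) =====
-- stated objective: alternative
-- what changed: Replaced the fused four-accumulator comparison loop (which also tracked unused minima) by a sort-then-pick strategy: each column (seeded with 0 to reproduce A's floor) is sorted in descending order and the first element taken.
import Mathlib
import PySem

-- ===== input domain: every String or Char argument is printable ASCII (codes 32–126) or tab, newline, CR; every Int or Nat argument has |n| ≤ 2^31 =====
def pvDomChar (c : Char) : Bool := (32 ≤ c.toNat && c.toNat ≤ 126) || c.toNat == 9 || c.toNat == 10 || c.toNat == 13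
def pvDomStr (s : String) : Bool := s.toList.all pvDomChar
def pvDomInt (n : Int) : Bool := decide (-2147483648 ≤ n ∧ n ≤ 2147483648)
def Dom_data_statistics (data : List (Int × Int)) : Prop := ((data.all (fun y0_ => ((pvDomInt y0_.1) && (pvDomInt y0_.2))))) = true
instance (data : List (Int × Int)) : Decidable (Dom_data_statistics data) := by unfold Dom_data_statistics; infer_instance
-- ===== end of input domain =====

-- B replaces A's fused four-accumulator comparison loop (with unused min tracking)
-- by a sort-then-pick strategy: each column, seeded with 0 to keep A's floor, is
-- sorted in descending order and the first element taken; alternative, not faster.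

-- ===== PORT A =====
def data_statistics (data : List (Int × Int)) : Int × Int :=
  let s := data.foldl
    (fun (st : Int × Int × Int × Int) triple =>
      let u := triple.1
      let i := triple.2
      let max_u := if u ≥ st.1 then u else st.1
      let max_i := if i ≥ st.2.1 then i else st.2.1
      let min_u := if u ≤ st.2.2.1 then u else st.2.2.1
      let min_i := if i ≤ st.2.2.2 then i else st.2.2.2
      (max_u, max_i, min_u, min_i))
    (0, 0, 10000, 10000)
  (s.1 + 1, s.2.1 + 1)

-- ===== PORT B =====
-- xs[0] of a (here always nonempty) list; the none branch is unreachable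
def pyFirst (xs : List Int) : Int :=
  match PySem.List.pyGet? xs 0 with
  | some v => v
  | none => 0

def data_statistics_alt (data : List (Int × Int)) : Int × Int :=
  let us := PySem.List.sorted (data.map (fun t => t.1) ++ [0]) (fun x => x) true
  let its := PySem.List.sorted (data.map (fun t => t.2) ++ [0]) (fun x => x) true
  (pyFirst us + 1, pyFirst its + 1)

-- ===== PRECONDITION & SPEC =====
def Spec_data_statistics (data : List (Int × Int)) (out : Int × Int) : Prop := out = data_statistics_alt data
instance (data : List (Int × Int)) (out : Int × Int) : Decidable (Spec_data_statistics data out) := by unfold Spec_data_statistics; infer_instance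

-- ===== CLAIM (what is proved, stated in full; the proofs are below) =====
def Claim_equal_data_statistics : Prop := ∀ (data : List (Int × Int)), Dom_data_statistics data → Spec_data_statistics data (data_statistics data)

-- ===== LEMMAS AND PROOFS =====

-- A's fused loop splits into four independent reductions
theorem loopA_split (data : List (Int × Int)) (a b c d : Int) :
    data.foldl
      (fun (st : Int × Int × Int × Int) triple =>
        let u := triple.1
        let i := triple.2
        let max_u := if u ≥ st.1 then u else st.1
        let max_i := if i ≥ st.2.1 then i else st.2.1
        let min_u := if u ≤ st.2.2.1 then u else st.2.2.1
        let min_i := if i ≤ st.2.2.2 then i else st.2.2.2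
        (max_u, max_i, min_u, min_i))
      (a, b, c, d)
    = (data.foldl (fun m y => max m y.1) a,
       data.foldl (fun m y => max m y.2) b,
       data.foldl (fun m y => min m y.1) c,
       data.foldl (fun m y => min m y.2) d) := by
  induction data generalizing a b c d with
  | nil => rfl
  | cons h t ih =>
      have e1 : ∀ m u : Int, (if u ≥ m then u else m) = max m u := by
        intro m u; simp only [max_def, ge_iff_le]
      have e2 : ∀ m u : Int, (if u ≤ m then u else m) = min m u := by
        intro m u; simp only [min_def]; split_ifs <;> omega
      simp only [List.foldl_cons]
      rw [ih]
      simp only [e1, e2]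

theorem foldl_max_is_ub (xs : List Int) (a : Int) :
    a ≤ xs.foldl max a ∧ ∀ y ∈ xs, y ≤ xs.foldl max a := by
  induction xs generalizing a with
  | nil => simp
  | cons h t ih =>
      obtain ⟨h1, h2⟩ := ih (max a h)
      refine ⟨le_trans (le_max_left a h) h1, ?_⟩
      intro y hy
      rcases List.mem_cons.mp hy with rfl | hmem
      · exact le_trans (le_max_right a y) h1
      · exact h2 y hmem

theorem foldl_max_mem (xs : List Int) (a : Int) :
    xs.foldl max a = a ∨ xs.foldl max a ∈ xs := by
  induction xs generalizing a with
  | nil => simp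
  | cons h t ih =>
      rcases ih (max a h) with heq | hmem
      · simp only [List.foldl_cons, heq]
        rcases max_choice a h with h' | h'
        · exact Or.inl h'
        · rw [h']; exact Or.inr List.mem_cons_self
      · exact Or.inr (List.mem_cons_of_mem _ hmem)

-- the head of the 0-seeded descending sort is exactly the 0-seeded running max
theorem first_sorted_rev_eq_foldl_max (xs : List Int) :
    pyFirst (PySem.List.sorted (xs ++ [0]) (fun x => x) true) = xs.foldl max 0 := by
  cases hs : PySem.List.sorted (xs ++ [0]) (fun x => x) true with
  | nil =>
      exfalso
      have := (PySem.List.sorted_eq_nil_iff _ _ _).mp hs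
      simp at this
  | cons m t =>
      have hub : ∀ y ∈ xs ++ [0], y ≤ m := by
        intro y hy
        exact PySem.List.key_head_sorted_rev_ge _ _ hs y hy
      have hm : m ∈ xs ++ [0] := by
        have : m ∈ PySem.List.sorted (xs ++ [0]) (fun x => x) true := by
          rw [hs]; exact List.mem_cons_self
        exact (PySem.List.mem_sorted _ _ _ _).mp this
      obtain ⟨hinit, hall⟩ := foldl_max_is_ub xs 0
      have h1 : m ≤ xs.foldl max 0 := by
        rcases List.mem_append.mp hm with hmem | h0
        · exact hall m hmem
        · simp at h0; omega
      have h2 : xs.foldl max 0 ≤ m := by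
        rcases foldl_max_mem xs 0 with heq | hmem
        · rw [heq]
          exact hub 0 (List.mem_append.mpr (Or.inr (List.mem_singleton_self ..)))
        · exact hub _ (List.mem_append.mpr (Or.inl hmem))
      have : pyFirst (m :: t) = m := by simp [pyFirst, PySem.List.pyGet?, PySem.List.pyIdx?]
      rw [this]
      omega

-- ===== VERDICT (by name: the statement is the Claim_ definition above) =====
theorem data_statistics_spec : Claim_equal_data_statistics := by
  intro data _
  unfold Spec_data_statistics data_statistics data_statistics_alt
  simp only [loopA_split, first_sorted_rev_eq_foldl_max, List.foldl_map]
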